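-- pv_equiv track=rewrite | github.com/AlexFrundin/pocker_one | exp/test_yield.py | setPos
-- ===== SOURCE A (Python) =====
-- def setPos(begin, end):
--     i=begin
--     while i>=begin and i<end:
--         yield i
--         i=i+1
--     while i<=end and i>begin:
--         yield i
--         i=i-1
-- ===== SOURCE B (Python) =====
-- def setPos(begin, end):
--     # Buffer the ascending run begin..end once, then emit it and the
--     # reversed interior for the descending leg (instead of a second
--     # decrementing while loop).
--     if begin >= end:
--         return
--         yield  # unreachable; keeps this function a generator
--     up = []
--     i = begin
--     while i <= end:
--         up.append(i)
--         i += 1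
--     yield from up
--     yield from reversed(up[1:][:-1])
-- ===== Notes on version B (the rewrite author's own statement) =====
-- stated objective: alternative
-- what changed: B buffers the ascending run begin..end into a list once and produces the descending leg by reversing the list's interior, replacing A's second decrementing while loop.
import Mathlib
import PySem

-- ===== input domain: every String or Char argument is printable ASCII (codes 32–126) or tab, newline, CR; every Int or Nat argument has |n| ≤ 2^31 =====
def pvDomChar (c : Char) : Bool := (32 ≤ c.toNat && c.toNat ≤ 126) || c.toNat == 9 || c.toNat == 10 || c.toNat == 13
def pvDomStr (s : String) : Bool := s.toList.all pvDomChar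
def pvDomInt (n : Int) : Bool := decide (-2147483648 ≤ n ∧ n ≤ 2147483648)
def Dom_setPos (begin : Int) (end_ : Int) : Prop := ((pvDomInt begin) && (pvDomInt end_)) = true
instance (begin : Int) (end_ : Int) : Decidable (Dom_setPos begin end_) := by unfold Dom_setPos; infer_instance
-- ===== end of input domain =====

-- B buffers the ascending run once and reverses its interior for the descending
-- leg, instead of A's second decrementing while loop (objective: alternative).

-- ===== PORT A =====
-- first while loop: yields i while i>=begin and i<end; returns (yielded, final i)
def setPosLoop1 (begin : Int) (end_ : Int) (i : Int) : List Int × Int :=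
  if h : begin ≤ i ∧ i < end_ then
    let r := setPosLoop1 begin end_ (i + 1)
    (i :: r.1, r.2)
  else ([], i)
termination_by (end_ - i).toNat
decreasing_by omega

-- second while loop: yields i while i<=end and i>begin
def setPosLoop2 (begin : Int) (end_ : Int) (i : Int) : List Int :=
  if h : i ≤ end_ ∧ begin < i then i :: setPosLoop2 begin end_ (i - 1)
  else []
termination_by (i - begin).toNat
decreasing_by omega

def setPos (begin : Int) (end_ : Int) : List Int :=
  let r := setPosLoop1 begin end_ begin
  r.1 ++ setPosLoop2 begin end_ r.2

-- ===== PORT B =====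
-- the buffering while loop: up = [begin, begin+1, ..., end]
def setPosUp (i : Int) (e : Int) : List Int :=
  if h : i ≤ e then i :: setPosUp (i + 1) e
  else []
termination_by (e + 1 - i).toNat
decreasing_by omega

def setPos_alt (begin : Int) (end_ : Int) : List Int :=
  if begin ≥ end_ then []
  else
    let up := setPosUp begin end_
    up ++ (PySem.List.slice (PySem.List.slice up (some 1) none) none (some (-1))).reverse

-- ===== PRECONDITION & SPEC =====
def Spec_setPos (begin : Int) (end_ : Int) (out : List Int) : Prop := out = setPos_alt begin end_
instance (begin : Int) (end_ : Int) (out : List Int) : Decidable (Spec_setPos begin end_ out) := by unfold Spec_setPos; infer_instance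

-- ===== CLAIM (what is proved, stated in full; the proofs are below) =====
def Claim_equal_setPos : Prop := ∀ (begin : Int) (end_ : Int), Dom_setPos begin end_ → Spec_setPos begin end_ (setPos begin end_)

-- ===== LEMMAS AND PROOFS =====

lemma setPosUp_snoc (a b : Int) (h : a ≤ b) :
    setPosUp a (b - 1) ++ [b] = setPosUp a b := by
  by_cases hab : a ≤ b - 1
  · have : (b - 1 + 1 - a).toNat < (b + 1 - a).toNat := by omega
    rw [show setPosUp a (b - 1) = a :: setPosUp (a + 1) (b - 1) from by
          rw [setPosUp, dif_pos hab],
        show setPosUp a b = a :: setPosUp (a + 1) b from by rw [setPosUp, dif_pos h]]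
    simp [setPosUp_snoc (a + 1) b (by omega)]
  · rw [show setPosUp a (b - 1) = [] from by rw [setPosUp, dif_neg hab]]
    rw [setPosUp, dif_pos h, setPosUp, dif_neg (by omega : ¬ a + 1 ≤ b)]
    simp
    omega
termination_by (b + 1 - a).toNat
decreasing_by omega

lemma setPosLoop1_eq (begin end_ i : Int) (h1 : begin ≤ i) (h2 : i ≤ end_) :
    (setPosLoop1 begin end_ i).2 = end_ ∧
    (setPosLoop1 begin end_ i).1 ++ [end_] = setPosUp i end_ := by
  by_cases hc : i < end_
  · rw [setPosLoop1, dif_pos ⟨h1, hc⟩]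
    obtain ⟨ih1, ih2⟩ := setPosLoop1_eq begin end_ (i + 1) (by omega) (by omega)
    refine ⟨ih1, ?_⟩
    rw [setPosUp, dif_pos h2]
    simp [ih2]
  · have hie : i = end_ := by omega
    rw [setPosLoop1, dif_neg (by omega)]
    subst hie
    rw [setPosUp, dif_pos le_rfl, setPosUp, dif_neg (by omega)]
    simp
termination_by (end_ - i).toNat
decreasing_by omega

lemma setPosLoop2_eq (begin end_ i : Int) (h2 : i ≤ end_) :
    setPosLoop2 begin end_ i = (setPosUp (begin + 1) i).reverse := by
  by_cases hc : begin < i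
  · rw [setPosLoop2, dif_pos ⟨h2, hc⟩,
      setPosLoop2_eq begin end_ (i - 1) (by omega),
      ← setPosUp_snoc (begin + 1) i (by omega)]
    simp
  · rw [setPosLoop2, dif_neg (by simp; omega), setPosUp, dif_neg (by omega)]
    simp
termination_by (i - begin).toNat
decreasing_by omega

lemma setPosUp_tail (a b : Int) (h : a ≤ b) :
    (setPosUp a b).tail = setPosUp (a + 1) b := by
  rw [setPosUp, dif_pos h]
  simp

-- ===== VERDICT (by name: the statement is the Claim_ definition above) =====
theorem setPos_spec : Claim_equal_setPos := by
  intro begin end_ _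
  unfold Spec_setPos setPos setPos_alt
  by_cases h : begin ≥ end_
  · rw [if_pos h]
    rw [setPosLoop1, dif_neg (by omega)]
    simp
    rw [setPosLoop2, dif_neg (by omega)]
  · rw [if_neg h]
    simp only
    obtain ⟨h1, h2⟩ := setPosLoop1_eq begin end_ begin le_rfl (by omega)
    rw [h1, setPosLoop2_eq begin end_ end_ le_rfl,
      PySem.List.slice_from_one, PySem.List.slice_to_neg_one,
      setPosUp_tail begin end_ (by omega)]
    have hd : (setPosUp (begin + 1) end_).dropLast = setPosUp (begin + 1) (end_ - 1) := by
      by_cases hb : begin + 1 ≤ end_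
      · rw [← setPosUp_snoc (begin + 1) end_ hb]
        simp
      · rw [setPosUp, dif_neg hb, setPosUp, dif_neg (by omega)]
        simp
    rw [hd, ← h2, ← setPosUp_snoc (begin + 1) end_ (by omega)]
    simp
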